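-- pv_equiv track=rewrite | github.com/luhengshiwo/mywork | text_cnn/util.py | read_conll
-- ===== SOURCE A (Python) =====
-- def read_conll(fstream):
--     """
--     读取CoNLL格式的数据，返回一个大的列表；
--     列表里是所有句子，每个句子表示为集合（[词1, 词2, ... , 词n], [标签1， 标签2, ... 标签n]）；
--     词和标签均为字符串。
--     """
--
--     ret = []
--     current_toks, current_lbls = [], []
--
--     for line in fstream:
--         line = line.strip()
--         if len(line) == 0 or line.startswith("-DOCSTART-"):
--             if len(current_toks) > 0:
--                 assert len(current_toks) == len(current_lbls)
--                 ret.append((current_toks, current_lbls))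
--             current_toks, current_lbls = [], []
--         else:
--             assert "\t" in line, r"Invalid CONLL format; expected a '\t' in {}".format(
--                 line)
--             tok, lbl = line.split("\t")
--             current_toks.append(tok)
--             current_lbls.append(lbl)
--     if len(current_toks) > 0:
--         assert len(current_toks) == len(current_lbls)
--         ret.append((current_toks, current_lbls))
--     return ret
-- ===== SOURCE B (Python) =====
-- from itertools import groupby
--
--
-- def read_conll(fstream):
--     def is_sep(line):
--         s = line.strip()
--         return len(s) == 0 or s.startswith("-DOCSTART-")
--
--     ret = []
--     for sep, group in groupby(fstream, key=is_sep):
--         if sep: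
--             continue
--         pairs = []
--         for line in group:
--             line = line.strip()
--             assert "\t" in line, r"Invalid CONLL format; expected a '\t' in {}".format(
--                 line)
--             tok, lbl = line.split("\t")
--             pairs.append((tok, lbl))
--         ret.append(([p[0] for p in pairs], [p[1] for p in pairs]))
--     return ret
-- ===== Notes on version B (the rewrite author's own statement) =====
-- stated objective: alternative
-- what changed: Replaces the flush-on-boundary mutable-accumulator state machine with itertools.groupby: the stream is grouped into separator/content runs, and each content run is mapped independently to its (tokens, labels) pair.
import Mathlib
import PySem

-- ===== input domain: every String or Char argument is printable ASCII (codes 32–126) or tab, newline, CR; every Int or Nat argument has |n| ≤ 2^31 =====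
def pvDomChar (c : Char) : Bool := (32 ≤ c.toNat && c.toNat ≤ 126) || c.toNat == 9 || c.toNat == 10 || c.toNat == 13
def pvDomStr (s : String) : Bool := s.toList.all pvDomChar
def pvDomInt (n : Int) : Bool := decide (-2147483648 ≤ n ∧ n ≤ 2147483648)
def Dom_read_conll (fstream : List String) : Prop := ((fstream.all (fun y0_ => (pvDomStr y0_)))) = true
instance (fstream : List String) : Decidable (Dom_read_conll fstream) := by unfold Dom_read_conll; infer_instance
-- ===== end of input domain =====

-- B replaces A's flush-on-boundary mutable-accumulator state machine with a group-then-map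
-- pass (itertools.groupby); return value only, same cost.

-- ===== PORT A =====
-- one step of A's for-loop over the state (ret, current_toks, current_lbls); branches in A's order.
-- 'tok, lbl = line.split("\t")' raises unless the split has exactly 2 parts; those inputs are
-- excluded by Pre_read_conll, so the port reads parts 0 and 1 of the split with a default.
def pvStepA (acc : List (List String × List String) × List String × List String)
    (line : String) : List (List String × List String) × List String × List String :=
  match acc with
  | (ret, toks, lbls) =>
    let s := PySem.Str.strip line
    if PySem.Str.len s = 0 ∨ PySem.Str.startswith s "-DOCSTART-" = true then
      (if toks.length > 0 then ret ++ [(toks, lbls)] else ret, [], [])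
    else
      let parts := (PySem.Str.split? s "\t").getD []
      (ret, toks ++ [parts.getD 0 ""], lbls ++ [parts.getD 1 ""])

def read_conll (fstream : List String) : List (List String × List String) :=
  let st := fstream.foldl pvStepA ([], [], [])
  if st.2.1.length > 0 then st.1 ++ [(st.2.1, st.2.2)] else st.1

-- ===== PORT B =====
def pvIsSep (line : String) : Bool :=
  let s := PySem.Str.strip line
  decide (PySem.Str.len s = 0) || PySem.Str.startswith s "-DOCSTART-"

-- the maximal runs of consecutive non-separator lines, in order
-- (itertools.groupby with key is_sep, separator groups skipped)
def pvGroups : List String → List (List String)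
  | [] => []
  | l :: ls =>
    if pvIsSep l then pvGroups ls
    else (l :: ls.takeWhile (fun x => !pvIsSep x)) ::
      pvGroups (ls.dropWhile (fun x => !pvIsSep x))
termination_by xs => xs.length
decreasing_by
  · simp
  · have := List.length_dropWhile_le (fun x => !pvIsSep x) ls
    simp at this ⊢; omega

-- strip and split one content line into its (tok, lbl) pair (same default-read as Port A)
def pvPairOf (line : String) : String × String :=
  let s := PySem.Str.strip line
  let parts := (PySem.Str.split? s "\t").getD []
  (parts.getD 0 "", parts.getD 1 "")

def pvSent (g : List String) : List String × List String :=
  let pairs := g.map pvPairOf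
  (pairs.map Prod.fst, pairs.map Prod.snd)

def read_conll_alt (fstream : List String) : List (List String × List String) :=
  (pvGroups fstream).map pvSent

-- ===== PRECONDITION & SPEC =====
-- Pre_ excludes exactly the inputs on which A raises: a content line (non-empty after strip,
-- not starting with "-DOCSTART-") whose stripped form does not contain exactly one tab
-- (AssertionError if no tab, ValueError from the two-way unpack if more than one).
def Pre_read_conll (fstream : List String) : Prop :=
  ∀ line ∈ fstream,
    ¬ pvIsSep line = true → PySem.Str.count (PySem.Str.strip line) "\t" = 1

instance (fstream : List String) : Decidable (Pre_read_conll fstream) := by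
  unfold Pre_read_conll; infer_instance

def pvWitness_read_conll : List String := ["a\tb", "", "-DOCSTART- x", "c\td", "e\tf"]

def Spec_read_conll (fstream : List String) (out : List (List String × List String)) : Prop := out = read_conll_alt fstream
instance (fstream : List String) (out : List (List String × List String)) : Decidable (Spec_read_conll fstream out) := by unfold Spec_read_conll; infer_instance

-- ===== CLAIM (what is proved, stated in full; the proofs are below) =====
def Claim_equal_read_conll : Prop := ∀ (fstream : List String), Dom_read_conll fstream → Pre_read_conll fstream → Spec_read_conll fstream (read_conll fstream)

-- ===== LEMMAS AND PROOFS =====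

-- A's loop re-stated as structural recursion over the remaining lines with the current
-- (toks, lbls) accumulator, final flush inlined — the bridge between the two ports.
def pvAux (toks lbls : List String) : List String → List (List String × List String)
  | [] => if toks.length > 0 then [(toks, lbls)] else []
  | l :: ls =>
    if pvIsSep l then
      (if toks.length > 0 then [(toks, lbls)] else []) ++ pvAux [] [] ls
    else
      pvAux (toks ++ [(pvPairOf l).1]) (lbls ++ [(pvPairOf l).2]) ls

theorem pvStepA_sep (ret : List (List String × List String)) (toks lbls : List String)
    (l : String) (h : pvIsSep l = true) :
    pvStepA (ret, toks, lbls) l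
      = (if toks.length > 0 then ret ++ [(toks, lbls)] else ret, [], []) := by
  have h' : PySem.Str.len (PySem.Str.strip l) = 0
      ∨ PySem.Str.startswith (PySem.Str.strip l) "-DOCSTART-" = true := by
    simpa [pvIsSep] using h
  simp only [pvStepA]
  rw [if_pos h']

theorem pvStepA_content (ret : List (List String × List String)) (toks lbls : List String)
    (l : String) (h : pvIsSep l = false) :
    pvStepA (ret, toks, lbls) l
      = (ret, toks ++ [(pvPairOf l).1], lbls ++ [(pvPairOf l).2]) := by
  have h' : ¬ (PySem.Str.len (PySem.Str.strip l) = 0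
      ∨ PySem.Str.startswith (PySem.Str.strip l) "-DOCSTART-" = true) := by
    simp only [pvIsSep, Bool.or_eq_false_iff, decide_eq_false_iff_not] at h
    rintro (h0 | h1)
    · exact h.1 h0
    · simp at h1; simp [h1] at h
  simp only [pvStepA, pvPairOf]
  rw [if_neg h']

-- A's port (fold + final flush) computes pvAux
theorem pvAux_foldl (fs : List String) :
    ∀ (ret : List (List String × List String)) (toks lbls : List String),
    (let st := fs.foldl pvStepA (ret, toks, lbls)
     if st.2.1.length > 0 then st.1 ++ [(st.2.1, st.2.2)] else st.1)
      = ret ++ pvAux toks lbls fs := by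
  induction fs with
  | nil => intro ret toks lbls; simp only [List.foldl_nil, pvAux]; split <;> simp
  | cons l ls ih =>
    intro ret toks lbls
    by_cases h : pvIsSep l = true
    · simp only [List.foldl_cons, pvStepA_sep _ _ _ _ h, pvAux, h, if_true]
      rw [ih]
      split <;> simp
    · simp only [Bool.not_eq_true] at h
      simp only [List.foldl_cons, pvStepA_content _ _ _ _ h, pvAux, h, Bool.false_eq_true,
        if_false]
      rw [ih]

@[simp] theorem pvSent_eq (g : List String) :
    pvSent g = (g.map (fun l => (pvPairOf l).1), g.map (fun l => (pvPairOf l).2)) := by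
  simp [pvSent]

-- a carried non-empty accumulator absorbs the leading content run, and the empty
-- accumulator yields exactly B's group-then-map result
theorem pvAux_run : ∀ (n : Nat) (ls : List String), ls.length ≤ n →
    ((∀ toks lbls : List String, 0 < toks.length →
      pvAux toks lbls ls =
        (toks ++ (ls.takeWhile (fun x => !pvIsSep x)).map (fun l => (pvPairOf l).1),
         lbls ++ (ls.takeWhile (fun x => !pvIsSep x)).map (fun l => (pvPairOf l).2)) ::
        (pvGroups (ls.dropWhile (fun x => !pvIsSep x))).map pvSent)
    ∧ pvAux [] [] ls = (pvGroups ls).map pvSent) := by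
  intro n
  induction n with
  | zero =>
    intro ls hle
    have hnil : ls = [] := List.length_eq_zero_iff.mp (Nat.le_zero.mp hle)
    subst hnil
    refine ⟨fun toks lbls ht => ?_, by simp [pvAux, pvGroups]⟩
    simp [pvAux, pvGroups, ht]
  | succ n ih =>
    intro ls hle
    match ls with
    | [] =>
      refine ⟨fun toks lbls ht => ?_, by simp [pvAux, pvGroups]⟩
      simp [pvAux, pvGroups, ht]
    | l :: ls' =>
      simp only [List.length_cons, Nat.succ_le_succ_iff] at hle
      by_cases h : pvIsSep l = true
      · constructor
        · intro toks lbls ht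
          simp only [pvAux, h, if_true,
            List.takeWhile_cons, List.dropWhile_cons, Bool.not_true, Bool.false_eq_true,
            if_false]
          rw [(ih ls' hle).2]
          have hg : pvGroups (l :: ls') = pvGroups ls' := by
            rw [pvGroups]; simp [h]
          rw [hg]
          simp [ht]
        · simp only [pvAux, h, if_true, List.length_nil, gt_iff_lt, Nat.lt_irrefl, if_false,
            List.nil_append]
          rw [(ih ls' hle).2]
          have hg : pvGroups (l :: ls') = pvGroups ls' := by
            rw [pvGroups]; simp [h]
          rw [hg]
      · simp only [Bool.not_eq_true] at h
        have hg : pvGroups (l :: ls') =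
            (l :: ls'.takeWhile (fun x => !pvIsSep x)) ::
              pvGroups (ls'.dropWhile (fun x => !pvIsSep x)) := by
          rw [pvGroups]; simp [h]
        constructor
        · intro toks lbls ht
          simp only [pvAux, h, Bool.false_eq_true, if_false, List.takeWhile_cons,
            List.dropWhile_cons, Bool.not_false, if_true]
          rw [(ih ls' hle).1 _ _ (by simp)]
          simp
        · simp only [pvAux, h, Bool.false_eq_true, if_false, List.nil_append]
          rw [(ih ls' hle).1 _ _ (by simp), hg]
          simp

-- ===== VERDICT (by name: the statement is the Claim_ definition above) =====
theorem read_conll_spec : Claim_equal_read_conll := by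
  intro fstream _ _
  show read_conll fstream = read_conll_alt fstream
  have h := pvAux_foldl fstream [] [] []
  simp only [List.nil_append] at h
  rw [read_conll, h, read_conll_alt, (pvAux_run fstream.length fstream le_rfl).2]
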